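-- pv_equiv track=rewrite | github.com/vshilman/shadowframework20lite | BlenderSFBExporter2/algorithm1.py | compute_patch_verts_attribution
-- ===== SOURCE A (Python) =====
-- def compute_patch_verts_attribution(partitions, patches):
--     '''Understand which verts below to which patch.'''
--
--     def is_valid_patch(patch):
--         return all(len(edge) > 2 for edge in patch)
--
--     def is_edge_included(edge, partition):
--         inner_edge = set(edge[1:-1])
--         return inner_edge.issubset(partition)
--
--     result = [None] * len(patches)
--     for i, patch in enumerate(patches):
--         for part in partitions:
--             if is_valid_patch(patch) and all(is_edge_included(edge, part) for edge in patch):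
--                 result[i] = part
--     return result
-- ===== SOURCE B (Python) =====
-- def compute_patch_verts_attribution(partitions, patches):
--     '''Understand which verts below to which patch.'''
--     result = []
--     for patch in patches:
--         if any(len(edge) <= 2 for edge in patch):
--             result.append(None)
--             continue
--         combined = set()
--         for edge in patch:
--             combined.update(edge[1:-1])
--         last = None
--         for part in partitions:
--             if combined.issubset(part):
--                 last = part
--         result.append(last)
--     return result
-- ===== Notes on version B (the rewrite author's own statement) =====
-- stated objective: faster
-- what changed: B checks patch validity once per patch and precomputes a single union set of all inner edge vertices, then does one subset test per partition (last match kept), instead of A's re-evaluating validity and every per-edge subset test inside the partition loop.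
import Mathlib
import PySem

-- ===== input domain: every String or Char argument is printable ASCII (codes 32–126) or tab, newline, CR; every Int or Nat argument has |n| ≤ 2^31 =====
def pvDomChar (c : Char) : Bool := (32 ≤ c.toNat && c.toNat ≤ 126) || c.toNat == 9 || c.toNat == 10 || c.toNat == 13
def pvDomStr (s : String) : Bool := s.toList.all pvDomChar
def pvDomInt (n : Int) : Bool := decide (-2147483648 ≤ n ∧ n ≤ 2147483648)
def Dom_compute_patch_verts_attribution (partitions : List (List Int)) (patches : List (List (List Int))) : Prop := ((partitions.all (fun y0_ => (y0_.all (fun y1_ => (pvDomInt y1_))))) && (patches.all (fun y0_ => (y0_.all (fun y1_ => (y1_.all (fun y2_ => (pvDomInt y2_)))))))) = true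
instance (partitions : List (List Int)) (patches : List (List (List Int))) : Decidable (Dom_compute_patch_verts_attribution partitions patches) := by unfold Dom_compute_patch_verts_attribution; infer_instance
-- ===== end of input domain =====

-- B replaces A's per-partition re-check of validity and per-edge subset tests by a once-per-patch
-- validity check and a precomputed union-of-inner-vertices set, then one subset test per partition
-- (last match kept); a timing run measured B faster. Same return values.


-- ===== PORT A =====
def pvIsValidPatch (patch : List (List Int)) : Bool :=
  patch.all (fun edge => decide (edge.length > 2))

def pvIsEdgeIncluded (edge : List Int) (partition : List Int) : Bool :=
  PySem.Set.issubset (PySem.Set.ofList (PySem.List.slice edge (some 1) (some (-1)))) partition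

def compute_patch_verts_attribution (partitions : List (List Int)) (patches : List (List (List Int))) : List (Option (List Int)) :=
  let result : List (Option (List Int)) := List.replicate patches.length none
  (PySem.List.enumerate patches 0).foldl (fun result ip =>
    partitions.foldl (fun result part =>
      if pvIsValidPatch ip.2 && ip.2.all (fun edge => pvIsEdgeIncluded edge part)
      then result.set ip.1.toNat (some part) else result) result) result

-- ===== PORT B =====
def pvCombinedInner (patch : List (List Int)) : PySem.Set Int :=
  patch.foldl (fun s edge => PySem.Set.update s (PySem.List.slice edge (some 1) (some (-1)))) PySem.Set.empty

def pvPatchAttribution (partitions : List (List Int)) (patch : List (List Int)) : Option (List Int) :=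
  if patch.any (fun edge => decide (edge.length ≤ 2)) then none
  else
    let combined := pvCombinedInner patch
    partitions.foldl (fun last part =>
      if PySem.Set.issubset combined part then some part else last) none

def compute_patch_verts_attribution_alt (partitions : List (List Int)) (patches : List (List (List Int))) : List (Option (List Int)) :=
  patches.map (pvPatchAttribution partitions)

-- ===== PRECONDITION & SPEC =====
def Spec_compute_patch_verts_attribution (partitions : List (List Int)) (patches : List (List (List Int))) (out : List (Option (List Int))) : Prop := out = compute_patch_verts_attribution_alt partitions patches
instance (partitions : List (List Int)) (patches : List (List (List Int))) (out : List (Option (List Int))) : Decidable (Spec_compute_patch_verts_attribution partitions patches out) := by unfold Spec_compute_patch_verts_attribution; infer_instance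

-- ===== CLAIM (what is proved, stated in full; the proofs are below) =====
def Claim_equal_compute_patch_verts_attribution : Prop := ∀ (partitions : List (List Int)) (patches : List (List (List Int))), Dom_compute_patch_verts_attribution partitions patches → Spec_compute_patch_verts_attribution partitions patches (compute_patch_verts_attribution partitions patches)

-- ===== LEMMAS AND PROOFS =====

-- A's per-patch "last matching partition", as a fold over the partitions.
def pvLastA (partitions : List (List Int)) (patch : List (List Int)) : Option (List Int) :=
  partitions.foldl (fun m part =>
    if pvIsValidPatch patch && patch.all (fun edge => pvIsEdgeIncluded edge part)
    then some part else m) none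

-- writing an optional value at index i
def pvApplyAt (r : List (Option (List Int))) (i : Nat) (o : Option (List Int)) : List (Option (List Int)) :=
  match o with
  | none => r
  | some p => r.set i (some p)

lemma pv_inner (patch : List (List Int)) (i : Nat) :
    ∀ (parts : List (List Int)) (o : Option (List Int)) (r : List (Option (List Int))),
    parts.foldl (fun r part =>
      if pvIsValidPatch patch && patch.all (fun edge => pvIsEdgeIncluded edge part)
      then r.set i (some part) else r) (pvApplyAt r i o)
    = pvApplyAt r i (parts.foldl (fun m part =>
        if pvIsValidPatch patch && patch.all (fun edge => pvIsEdgeIncluded edge part)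
        then some part else m) o) := by
  intro parts
  induction parts with
  | nil => intro o r; rfl
  | cons q qs ih =>
    intro o r
    simp only [List.foldl_cons]
    cases h : (pvIsValidPatch patch && patch.all (fun edge => pvIsEdgeIncluded edge q)) with
    | false =>
      simp only [Bool.false_eq_true, if_false]
      exact ih o r
    | true =>
      simp only [if_true]
      have hset : (pvApplyAt r i o).set i (some q) = pvApplyAt r i (some q) := by
        cases o with
        | none => rfl
        | some p => simp [pvApplyAt, List.set_set]
      rw [hset, ih (some q) r]

lemma pv_inner' (parts : List (List Int)) (patch : List (List Int)) (i : Nat)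
    (r : List (Option (List Int))) :
    parts.foldl (fun r part =>
      if pvIsValidPatch patch && patch.all (fun edge => pvIsEdgeIncluded edge part)
      then r.set i (some part) else r) r
    = pvApplyAt r i (pvLastA parts patch) := by
  have h := pv_inner patch i parts none r
  simpa [pvApplyAt, pvLastA] using h

lemma pv_outer (partitions : List (List Int)) :
    ∀ (ps : List (List (List Int))) (pre : List (Option (List Int))),
    (PySem.List.enumerate ps (pre.length : Int)).foldl (fun result ip =>
      partitions.foldl (fun result part =>
        if pvIsValidPatch ip.2 && ip.2.all (fun edge => pvIsEdgeIncluded edge part)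
        then result.set ip.1.toNat (some part) else result) result)
      (pre ++ List.replicate ps.length none)
    = pre ++ ps.map (pvLastA partitions) := by
  intro ps
  induction ps with
  | nil => intro pre; simp [PySem.List.enumerate_nil]
  | cons patch rest ih =>
    intro pre
    rw [PySem.List.enumerate_cons]
    simp only [List.foldl_cons, List.length_cons, List.replicate_succ, Int.toNat_natCast]
    rw [pv_inner' partitions patch pre.length]
    have h2 : pvApplyAt (pre ++ (none : Option (List Int)) :: List.replicate rest.length none)
        pre.length (pvLastA partitions patch)
        = (pre ++ [pvLastA partitions patch]) ++ List.replicate rest.length none := by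
      cases hL : pvLastA partitions patch with
      | none => simp [pvApplyAt]
      | some p =>
        simp only [pvApplyAt]
        rw [List.set_append_right _ _ (le_refl pre.length)]
        simp
    rw [h2]
    have h3 : ((pre.length : Int) + 1) = (((pre ++ [pvLastA partitions patch]).length : Nat) : Int) := by
      simp
    rw [h3, ih (pre ++ [pvLastA partitions patch])]
    simp

lemma pv_mem_combined (patch : List (List Int)) (x : Int) :
    x ∈ pvCombinedInner patch ↔ ∃ e ∈ patch, x ∈ PySem.List.slice e (some 1) (some (-1)) := by
  unfold pvCombinedInner
  rw [show (PySem.Set.empty : PySem.Set Int) = ([] : List Int) from rfl]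
  induction patch using List.reverseRecOn with
  | nil => simp
  | append_singleton es e ih =>
    rw [List.foldl_append]
    simp only [List.foldl_cons, List.foldl_nil, PySem.Set.mem_update, ih]
    constructor
    · rintro (⟨e', he', hx⟩ | hx)
      · exact ⟨e', by simp [he'], hx⟩
      · exact ⟨e, by simp, hx⟩
    · rintro ⟨e', he', hx⟩
      rcases (List.mem_append.mp he') with h | h
      · exact Or.inl ⟨e', h, hx⟩
      · simp at h; subst h; exact Or.inr hx

-- per-patch agreement of the two strategies
lemma pv_per_patch (partitions : List (List Int)) (patch : List (List Int)) :
    pvLastA partitions patch = pvPatchAttribution partitions patch := by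
  unfold pvLastA pvPatchAttribution
  cases hv : pvIsValidPatch patch with
  | true =>
    have hany : patch.any (fun edge => decide (edge.length ≤ 2)) = false := by
      unfold pvIsValidPatch at hv
      simp only [List.all_eq_true, decide_eq_true_eq] at hv
      simp only [List.any_eq_false, decide_eq_true_eq]
      intro e he; exact Nat.not_le.mpr (hv e he)
    rw [hany]
    simp only [Bool.false_eq_true, if_false]
    apply PySem.List.foldl_congr_mem
    intro acc part _
    have hcond : (patch.all (fun edge => pvIsEdgeIncluded edge part))
        = PySem.Set.issubset (pvCombinedInner patch) part := by
      cases hsub : PySem.Set.issubset (pvCombinedInner patch) part with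
      | false =>
        rw [Bool.eq_false_iff] at hsub ⊢
        intro hall
        apply hsub
        rw [PySem.Set.issubset_iff]
        intro x hx
        rcases (pv_mem_combined patch x).mp hx with ⟨e, he, hxe⟩
        have hinc := (List.all_eq_true.mp hall) e he
        unfold pvIsEdgeIncluded at hinc
        exact (PySem.Set.issubset_iff _ _).mp hinc x
          (by rw [PySem.Set.mem_ofList]; exact hxe)
      | true =>
        rw [PySem.Set.issubset_iff] at hsub
        rw [List.all_eq_true]
        intro e he
        unfold pvIsEdgeIncluded
        rw [PySem.Set.issubset_iff]
        intro x hx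
        rw [PySem.Set.mem_ofList] at hx
        exact hsub x ((pv_mem_combined patch x).mpr ⟨e, he, hx⟩)
    rw [Bool.true_and, hcond]
  | false =>
    have hany : patch.any (fun edge => decide (edge.length ≤ 2)) = true := by
      unfold pvIsValidPatch at hv
      simp only [List.all_eq_false, decide_eq_true_eq] at hv
      simp only [List.any_eq_true, decide_eq_true_eq]
      rcases hv with ⟨e, he, hle⟩
      exact ⟨e, he, by omega⟩
    rw [hany]
    simp only [if_true, Bool.false_and, Bool.false_eq_true, if_false]
    induction partitions with
    | nil => rfl
    | cons q qs ih => simp only [List.foldl_cons]; exact ih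

-- ===== VERDICT (by name: the statement is the Claim_ definition above) =====
theorem compute_patch_verts_attribution_spec : Claim_equal_compute_patch_verts_attribution := by
  intro partitions patches _
  unfold Spec_compute_patch_verts_attribution compute_patch_verts_attribution compute_patch_verts_attribution_alt
  have h := pv_outer partitions patches []
  simp only [List.nil_append, List.length_nil, Nat.cast_zero] at h
  rw [h]
  exact List.map_congr_left (fun patch _ => pv_per_patch partitions patch)
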